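-- pv_equiv track=rewrite | github.com/hiddefolkertsma/LibriMix | scripts/chunk_speakers.py | dst_iterator
-- ===== SOURCE A (Python) =====
-- from typing import Any, Iterator, Tuple
-- import itertools
--
-- EXT = '.flac'
--
-- def dst_iterator(inp: Iterator[Any], dst: str='') -> Iterator[Tuple[str, Any]]:
--     counter = None
--     last_speaker = None
--     for speaker, add, item in inp:
--         if speaker != last_speaker:
--             counter = itertools.count(start=1)
--             last_speaker = speaker
--         nonce = next(counter)
--         yield f"{dst}/{speaker}/{nonce}{EXT}", add, item
-- ===== SOURCE B (Python) =====
-- from bisect import bisect_right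
--
-- EXT = '.flac'
--
-- def dst_iterator(inp, dst=''):
--     items = list(inp)
--     # one pass to record where each run of equal speakers starts ...
--     starts = [i for i, t in enumerate(items)
--               if i == 0 or t[0] != items[i - 1][0]]
--     # ... then each nonce is computed independently: distance from the
--     # binary-searched last run start at or before i.
--     for i, (speaker, add, item) in enumerate(items):
--         nonce = i - starts[bisect_right(starts, i) - 1] + 1
--         yield f"{dst}/{speaker}/{nonce}{EXT}", add, item
-- ===== Notes on version B (the rewrite author's own statement) =====
-- stated objective: alternative
-- what changed: B first materialises the list of run-start indices in a comprehension, then computes every element's nonce independently as i - (bisect_right-located last run start <= i) + 1, replacing A's sequential last_speaker/counter state machine with a precomputed boundary index plus binary search.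
import Mathlib
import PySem

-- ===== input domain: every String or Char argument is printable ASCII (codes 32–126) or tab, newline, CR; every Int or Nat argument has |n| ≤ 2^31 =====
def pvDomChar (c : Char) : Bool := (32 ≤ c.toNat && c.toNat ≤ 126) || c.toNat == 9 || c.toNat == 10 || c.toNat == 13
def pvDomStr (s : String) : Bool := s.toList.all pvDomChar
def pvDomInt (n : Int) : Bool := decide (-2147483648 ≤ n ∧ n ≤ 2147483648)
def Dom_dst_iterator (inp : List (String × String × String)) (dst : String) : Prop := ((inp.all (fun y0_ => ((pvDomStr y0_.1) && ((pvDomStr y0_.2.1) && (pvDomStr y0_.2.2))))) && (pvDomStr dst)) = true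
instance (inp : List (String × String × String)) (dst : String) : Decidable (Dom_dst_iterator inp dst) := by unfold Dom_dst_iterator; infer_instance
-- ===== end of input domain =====

-- B replaces A's sequential last_speaker/counter state machine by a precomputed list of
-- run-start indices plus a per-element binary search (alternative algorithm, same value;
-- both Pythons are generators, compared as the list of triples they yield).

-- ===== PORT A =====
-- A's loop: state = (last_speaker : Option String, counter holding the NEXT value to yield).
def dstIterGoA (dst : String) : List (String × String × String) → Option String → Int → List (String × String × String)
  | [], _, _ => []
  | (speaker, add, item) :: rest, lastSpeaker, c =>
    -- if speaker != last_speaker: counter = count(start=1); last_speaker = speaker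
    let c' : Int := if some speaker ≠ lastSpeaker then 1 else c
    let last' : Option String := if some speaker ≠ lastSpeaker then some speaker else lastSpeaker
    -- nonce = next(counter)
    (dst ++ "/" ++ speaker ++ "/" ++ PySem.Int.toStr c' ++ ".flac", add, item) ::
      dstIterGoA dst rest last' (c' + 1)

def dst_iterator (inp : List (String × String × String)) (dst : String) : List (String × String × String) :=
  dstIterGoA dst inp none 1

-- ===== PORT B =====
-- starts = [i for i, t in enumerate(items) if i == 0 or t[0] != items[i-1][0]]
-- (pyGetD is exact here: items[i-1] is only reached with 1 ≤ i < len(items)).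
def pvStarts (items : List (String × String × String)) : List Int :=
  ((PySem.List.enumerate items).filter
    (fun p => p.1 == 0 || !(p.2.1 == (PySem.List.pyGetD items (p.1 - 1) ("", "", "")).1))).map (·.1)

-- bisect.bisect_right on a sorted list = number of elements ≤ x (stdlib call).
def pvBisectRight (a : List Int) (x : Int) : Nat :=
  a.countP (fun s => decide (s ≤ x))

-- for i, (speaker, add, item) in enumerate(items): nonce = i - starts[bisect_right(starts, i) - 1] + 1
-- (getD is exact: bisect_right ≥ 1 whenever the loop runs, since starts[0] = 0 ≤ i).
def dst_iterator_alt (inp : List (String × String × String)) (dst : String) : List (String × String × String) :=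
  let items := inp
  let starts := pvStarts items
  (PySem.List.enumerate items).map (fun p =>
    let nonce : Int := p.1 - starts.getD (pvBisectRight starts p.1 - 1) 0 + 1
    (dst ++ "/" ++ p.2.1 ++ "/" ++ PySem.Int.toStr nonce ++ ".flac", p.2.2.1, p.2.2.2))

-- ===== PRECONDITION & SPEC =====
def Spec_dst_iterator (inp : List (String × String × String)) (dst : String) (out : List (String × String × String)) : Prop := out = dst_iterator_alt inp dst
instance (inp : List (String × String × String)) (dst : String) (out : List (String × String × String)) : Decidable (Spec_dst_iterator inp dst out) := by unfold Spec_dst_iterator; infer_instance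

-- ===== CLAIM (what is proved, stated in full; the proofs are below) =====
def Claim_equal_dst_iterator : Prop := ∀ (inp : List (String × String × String)) (dst : String), Dom_dst_iterator inp dst → Spec_dst_iterator inp dst (dst_iterator inp dst)

-- ===== LEMMAS AND PROOFS =====

-- The canonical per-run enumeration both sides are reduced to.
def dstIterEmit (dst speaker : String) (nonce : Int) : List (String × String × String) → List (String × String × String)
  | [] => []
  | (_, add, item) :: rest =>
    (dst ++ "/" ++ speaker ++ "/" ++ PySem.Int.toStr nonce ++ ".flac", add, item) ::
      dstIterEmit dst speaker (nonce + 1) rest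

-- A within one run: emits the enumeration and keeps last_speaker = sp.
theorem dstIterGoA_run (dst sp : String) (grp : List (String × String × String))
    (hgrp : ∀ y ∈ grp, y.1 = sp) (rest : List (String × String × String)) (k : Int) :
    dstIterGoA dst (grp ++ rest) (some sp) k =
      dstIterEmit dst sp k grp ++ dstIterGoA dst rest (some sp) (k + grp.length) := by
  induction grp generalizing k with
  | nil => simp [dstIterEmit]
  | cons y ys ih =>
    obtain ⟨sy, ay, iy⟩ := y
    have hy : sy = sp := hgrp _ (List.mem_cons_self ..)
    subst hy
    simp only [List.cons_append, dstIterGoA, dstIterEmit]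
    rw [if_neg (by simp), if_neg (by simp),
      ih (fun z hz => hgrp z (List.mem_cons_of_mem _ hz))]
    simp only [List.length_cons]
    push_cast
    rw [show k + 1 + (ys.length : Int) = k + ((ys.length : Int) + 1) from by ring]

theorem enumerate_shift {α : Type} (l : List α) (s : Int) :
    PySem.List.enumerate l s = (PySem.List.enumerate l 0).map (fun p => (s + p.1, p.2)) := by
  induction l generalizing s with
  | nil => simp [PySem.List.enumerate_nil]
  | cons x xs ih =>
    rw [PySem.List.enumerate_cons, PySem.List.enumerate_cons, List.map_cons,
      ih (s+1), show (0:Int)+1 = 1 from rfl, ih 1, List.map_map]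
    simp [Function.comp_def, add_assoc]

theorem pvStarts_nonneg (l : List (String × String × String)) :
    ∀ s ∈ pvStarts l, 0 ≤ s := by
  intro s hs
  unfold pvStarts at hs
  obtain ⟨p, hp, rfl⟩ := List.mem_map.mp hs
  have hp' := List.mem_of_mem_filter hp
  obtain ⟨k, hk, rfl⟩ := (PySem.List.mem_enumerate_iff _ _ _).mp hp'
  simp

theorem pvStarts_head (x : String × String × String) (xs : List (String × String × String)) :
    ∃ t, pvStarts (x :: xs) = 0 :: t := by
  unfold pvStarts
  rw [PySem.List.enumerate_cons, List.filter_cons]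
  simp only [show ((0:Int) == 0) = true from rfl, Bool.true_or, if_pos]
  exact ⟨_, rfl⟩

theorem mem_pvStarts_zero (x : String × String × String) (xs : List (String × String × String)) :
    (0 : Int) ∈ pvStarts (x :: xs) := by
  obtain ⟨t, ht⟩ := pvStarts_head x xs
  rw [ht]; exact List.mem_cons_self ..

-- run decomposition of the starts list
theorem pvStarts_run (run rest : List (String × String × String)) (sp : String)
    (hne : run ≠ []) (hrun : ∀ y ∈ run, y.1 = sp)
    (hrest : ∀ y r, rest = y :: r → y.1 ≠ sp) :
    pvStarts (run ++ rest) = 0 :: (pvStarts rest).map (fun s => (run.length : Int) + s) := by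
  obtain ⟨h, t, rfl⟩ : ∃ h t, run = h :: t := by
    cases run with
    | nil => exact absurd rfl hne
    | cons a b => exact ⟨a, b, rfl⟩
  unfold pvStarts
  rw [PySem.List.enumerate_append, List.filter_append, List.map_append]
  have hpart1 : ((PySem.List.enumerate (h :: t) 0).filter
      (fun p => p.1 == 0 || !(p.2.1 == (PySem.List.pyGetD ((h :: t) ++ rest) (p.1 - 1) ("", "", "")).1))).map (·.1) = [0] := by
    rw [PySem.List.enumerate_cons, List.filter_cons]
    have htail : (PySem.List.enumerate t (0+1)).filter
        (fun p => p.1 == 0 || !(p.2.1 == (PySem.List.pyGetD ((h :: t) ++ rest) (p.1 - 1) ("", "", "")).1)) = [] := by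
      rw [List.filter_eq_nil_iff]
      intro p hp
      obtain ⟨k, hk, rfl⟩ := (PySem.List.mem_enumerate_iff _ _ _).mp hp
      have hidx : (0 + 1 + (k : Int)) - 1 = ((k : Nat) : Int) := by push_cast; ring
      have hklt : k < (h :: t).length := by simp; omega
      have hprev : (PySem.List.pyGetD ((h :: t) ++ rest) ((0 + 1 + (k : Int)) - 1) ("", "", "")) = (h :: t)[k] := by
        rw [hidx, PySem.List.pyGetD_natCast, List.getD_append _ _ _ _ hklt, List.getD_eq_getElem _ _ hklt]
      simp only [hprev]
      have h1 : t[k].1 = sp := hrun _ (List.mem_cons_of_mem _ (List.getElem_mem hk))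
      have h2 : (h :: t)[k].1 = sp := hrun _ (List.getElem_mem hklt)
      simp [h1, h2]
      omega
    rw [htail]
    simp
  rw [hpart1]
  have hpart2 : ((PySem.List.enumerate rest (0 + ((h :: t).length : Int))).filter
      (fun p => p.1 == 0 || !(p.2.1 == (PySem.List.pyGetD ((h :: t) ++ rest) (p.1 - 1) ("", "", "")).1))).map (·.1) =
      ((pvStarts rest).map (fun s => (((h :: t).length : Int)) + s)) := by
    rw [enumerate_shift rest, List.filter_map, List.map_map]
    unfold pvStarts
    rw [List.map_map]
    rw [List.filter_congr (q := (fun p => p.1 == 0 || !(p.2.1 == (PySem.List.pyGetD rest (p.1 - 1) ("", "", "")).1))) ?_]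
    · apply List.map_congr_left
      intro p hp
      simp
    · intro p hp
      obtain ⟨k, hk, rfl⟩ := (PySem.List.mem_enumerate_iff _ _ _).mp hp
      simp only [Function.comp_apply]
      cases k with
      | zero =>
        obtain ⟨y, r, rfl⟩ : ∃ y r, rest = y :: r := by
          cases rest with
          | nil => simp at hk
          | cons a b => exact ⟨a, b, rfl⟩
        have hidx : (0 + ((h :: t).length : Int) + (0 + ((0:Nat) : Int))) - 1 = (((h :: t).length - 1 : Nat) : Int) := by
          simp
        have hklt : (h :: t).length - 1 < (h :: t).length := by simp
        have hprev : PySem.List.pyGetD ((h :: t) ++ (y :: r)) ((0 + ((h :: t).length : Int) + (0 + ((0:Nat) : Int))) - 1) ("", "", "") = (h :: t)[(h :: t).length - 1] := by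
          rw [hidx, PySem.List.pyGetD_natCast, List.getD_append _ _ _ _ hklt, List.getD_eq_getElem _ _ hklt]
        rw [hprev]
        have h1 : (h :: t)[(h :: t).length - 1].1 = sp := hrun _ (List.getElem_mem hklt)
        have h2 : y.1 ≠ sp := hrest y r rfl
        rw [h1]
        simp [h2]
      | succ j =>
        have hidx : (0 + ((h :: t).length : Int) + (0 + ((j+1 : Nat) : Int))) - 1 = (((h :: t).length + j : Nat) : Int) := by
          push_cast; ring
        have hge : (h :: t).length ≤ (h :: t).length + j := by omega
        have hprev : PySem.List.pyGetD ((h :: t) ++ rest) ((0 + ((h :: t).length : Int) + (0 + ((j+1 : Nat) : Int))) - 1) ("", "", "") = rest.getD j ("", "", "") := by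
          rw [hidx, PySem.List.pyGetD_natCast, List.getD_append_right _ _ _ _ hge]
          congr 1
          omega
        have hidx2 : (0 + ((j+1 : Nat) : Int)) - 1 = ((j : Nat) : Int) := by push_cast; ring
        have hprev2 : PySem.List.pyGetD rest ((0 + ((j+1 : Nat) : Int)) - 1) ("", "", "") = rest.getD j ("", "", "") := by
          rw [hidx2, PySem.List.pyGetD_natCast]
        rw [hprev, hprev2]
        have hne1 : ((0 : Int) + ((h :: t).length : Int) + (0 + ((j+1 : Nat) : Int)) == 0) = false := by
          simp
          omega
        have hne2 : (((0:Int) + ((j+1 : Nat) : Int)) == 0) = false := by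
          simp
          omega
        rw [hne1, hne2]
  rw [hpart2]
  rfl

theorem emit_enum (dst sp : String) (l : List (String × String × String)) : ∀ (s : Int),
    (∀ y ∈ l, y.1 = sp) →
    (PySem.List.enumerate l s).map
      (fun p => (dst ++ "/" ++ p.2.1 ++ "/" ++ PySem.Int.toStr (p.1 + 1) ++ ".flac", p.2.2.1, p.2.2.2)) =
    dstIterEmit dst sp (s + 1) l := by
  induction l with
  | nil => intro s _; simp [PySem.List.enumerate_nil, dstIterEmit]
  | cons y ys ih =>
    intro s hl
    obtain ⟨y1, y2, y3⟩ := y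
    have hy : y1 = sp := hl _ (List.mem_cons_self ..)
    subst hy
    rw [PySem.List.enumerate_cons, List.map_cons, dstIterEmit,
      ih (s + 1) (fun z hz => hl z (List.mem_cons_of_mem _ hz))]

-- B's run decomposition
theorem alt_run (dst : String) (run rest : List (String × String × String)) (sp : String)
    (hne : run ≠ []) (hrun : ∀ y ∈ run, y.1 = sp)
    (hrest : ∀ y r, rest = y :: r → y.1 ≠ sp) :
    dst_iterator_alt (run ++ rest) dst =
      dstIterEmit dst sp 1 run ++ dst_iterator_alt rest dst := by
  simp only [dst_iterator_alt]
  rw [pvStarts_run run rest sp hne hrun hrest,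
    PySem.List.enumerate_append, List.map_append]
  congr 1
  · -- first run: nonce = i + 1
    rw [show (1 : Int) = 0 + 1 from rfl, ← emit_enum dst sp run 0 hrun]
    apply List.map_congr_left
    intro p hp
    obtain ⟨k, hk, rfl⟩ := (PySem.List.mem_enumerate_iff _ _ _).mp hp
    have hcnt0 : ((pvStarts rest).map (fun s => (run.length : Int) + s)).countP
        (fun s => decide (s ≤ 0 + (k : Int))) = 0 := by
      rw [List.countP_map, List.countP_eq_zero]
      intro s hs
      have h0 : 0 ≤ s := pvStarts_nonneg rest s hs
      simp [Function.comp]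
      omega
    have hbis : pvBisectRight (0 :: (pvStarts rest).map (fun s => (run.length : Int) + s)) (0 + (k : Int)) = 1 := by
      unfold pvBisectRight
      rw [List.countP_cons, hcnt0]
      simp
    rw [hbis]
    simp
  · -- shifted rest
    rw [enumerate_shift rest, List.map_map]
    apply List.map_congr_left
    intro p hp
    obtain ⟨k, hk, rfl⟩ := (PySem.List.mem_enumerate_iff _ _ _).mp hp
    obtain ⟨y, r, hyr⟩ : ∃ y r, rest = y :: r := by
      cases rest with
      | nil => simp at hk
      | cons a b => exact ⟨a, b, rfl⟩
    simp only [Function.comp_apply]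
    set S := pvStarts rest with hS
    set c := pvBisectRight S (0 + (k : Int)) with hc
    have hc1 : 1 ≤ c := by
      have hmem : (0 : Int) ∈ S := by rw [hS, hyr]; exact mem_pvStarts_zero y r
      have hpos : 0 < S.countP (fun s => decide (s ≤ 0 + (k : Int))) :=
        List.countP_pos_iff.mpr ⟨0, hmem, by simp⟩
      rw [hc]
      unfold pvBisectRight
      omega
    have hc2 : c ≤ S.length := by
      rw [hc]; unfold pvBisectRight; exact List.countP_le_length ..
    have hbis : pvBisectRight (0 :: S.map (fun s => (run.length : Int) + s))
        (0 + (run.length : Int) + (0 + (k : Int))) = c + 1 := by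
      unfold pvBisectRight
      rw [List.countP_cons, List.countP_map]
      have hcong : List.countP ((fun s => decide (s ≤ 0 + (run.length : Int) + (0 + (k : Int)))) ∘ (fun s => (run.length : Int) + s)) S
          = List.countP (fun s => decide (s ≤ 0 + (k : Int))) S := by
        apply List.countP_congr
        intro s hs
        simp [Function.comp]
      rw [hcong, hc]
      unfold pvBisectRight
      rw [if_pos (by simp only [decide_eq_true_eq]; positivity)]
    rw [hbis]
    have hgd : (0 :: S.map (fun s => (run.length : Int) + s)).getD (c + 1 - 1) 0 =
        (run.length : Int) + S.getD (c - 1) 0 := by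
      have h1 : c + 1 - 1 = (c - 1) + 1 := by omega
      rw [h1, List.getD_cons_succ]
      have h2 : c - 1 < S.length := by omega
      rw [List.getD_eq_getElem _ _ (by simpa using h2), List.getD_eq_getElem _ _ h2, List.getElem_map]
    rw [hgd]
    have : (0 : Int) + (run.length : Int) + (0 + (k : Int)) - ((run.length : Int) + S.getD (c - 1) 0) + 1 =
        0 + (k : Int) - S.getD (c - 1) 0 + 1 := by ring
    rw [this]

-- A, started in a state that forces a reset on the first element, equals B.
theorem dstIterGoA_eq_alt (dst : String) : ∀ (n : Nat) (inp : List (String × String × String)),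
    inp.length ≤ n → ∀ (last : Option String) (c : Int),
    (∀ x rest, inp = x :: rest → some x.1 ≠ last) →
    dstIterGoA dst inp last c = dst_iterator_alt inp dst := by
  intro n
  induction n with
  | zero =>
    intro inp hlen last c _
    rw [List.length_eq_zero_iff.mp (Nat.le_zero.mp hlen)]
    simp [dstIterGoA, dst_iterator_alt, pvStarts, PySem.List.enumerate]
  | succ n ih =>
    intro inp hlen last c hhead
    match inp with
    | [] => simp [dstIterGoA, dst_iterator_alt, pvStarts, PySem.List.enumerate]
    | x :: xs =>
      obtain ⟨sp, ad, it⟩ := x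
      have hne : some sp ≠ last := hhead _ _ rfl
      set grp := xs.takeWhile (fun y => y.1 == sp) with hgrpdef
      set rest := xs.dropWhile (fun y => y.1 == sp) with hrestdef
      have hsplit : xs = grp ++ rest := (List.takeWhile_append_dropWhile).symm
      have hgrp : ∀ y ∈ grp, y.1 = sp := by
        intro y hy
        have := List.mem_takeWhile_imp (hgrpdef ▸ hy)
        simpa using this
      have hresthead : ∀ y r, rest = y :: r → y.1 ≠ sp := by
        intro y r hr
        have := List.head?_dropWhile_not (fun y => y.1 == sp) xs
        rw [← hrestdef, hr] at this
        simpa using this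
      have hrestlen : rest.length ≤ n := by
        have h1 : rest.length ≤ xs.length := List.length_dropWhile_le _ _
        have h2 : xs.length + 1 ≤ n + 1 := by simpa using hlen
        omega
      have hrun : ∀ y ∈ (sp, ad, it) :: grp, y.1 = sp := by
        intro y hy
        rcases List.mem_cons.mp hy with h | h
        · rw [h]
        · exact hgrp y h
      have hA : dstIterGoA dst ((sp, ad, it) :: xs) last c =
          dstIterEmit dst sp 1 ((sp, ad, it) :: grp) ++ dstIterGoA dst rest (some sp) (1 + ((sp, ad, it) :: grp).length) := by
        conv_lhs => rw [show (sp, ad, it) :: xs = (sp, ad, it) :: (grp ++ rest) from by rw [← hsplit]]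
        simp only [dstIterGoA, dstIterEmit]
        rw [if_pos hne, if_pos hne,
          dstIterGoA_run dst sp grp hgrp rest (1 + 1)]
        simp only [List.cons_append, List.length_cons]
        push_cast
        rw [show (2 : Int) + (grp.length : Int) = 1 + ((grp.length : Int) + 1) from by ring]
      rw [hA]
      have hrec : dstIterGoA dst rest (some sp) (1 + ((sp, ad, it) :: grp).length) = dst_iterator_alt rest dst := by
        refine ih rest hrestlen _ _ ?_
        intro y r hr
        simpa using hresthead y r hr
      rw [hrec]
      have hcons : (sp, ad, it) :: xs = ((sp, ad, it) :: grp) ++ rest := by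
        rw [List.cons_append, hsplit]
      rw [hcons, alt_run dst ((sp, ad, it) :: grp) rest sp (by simp) hrun hresthead]

-- ===== VERDICT (by name: the statement is the Claim_ definition above) =====
theorem dst_iterator_spec : Claim_equal_dst_iterator := by
  intro inp dst _
  unfold Spec_dst_iterator dst_iterator
  exact dstIterGoA_eq_alt dst inp.length inp le_rfl none 1 (fun x r _ => by simp)
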